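-- pv_equiv track=rewrite | github.com/iVicky7/BATCH-02 | a.py | least_loaded
-- ===== SOURCE A (Python) =====
-- def least_loaded(nodes, tasks):
--     assignments = {}
--     load = {node: 0 for node in nodes}
--     for task in tasks:
--         least_loaded_node = min(load, key=load.get)
--         assignments[task] = least_loaded_node
--         load[least_loaded_node] += 1
--     return assignments
-- ===== SOURCE B (Python) =====
-- def least_loaded(nodes, tasks):
--     # Greedy "least loaded" from all-zero loads with first-key tie-breaking
--     # is exactly round-robin over the distinct nodes in first-occurrence order.
--     ring = list(dict.fromkeys(nodes))
--     k = len(ring)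
--     return {task: ring[i % k] for i, task in enumerate(tasks)}
-- ===== Notes on version B (the rewrite author's own statement) =====
-- stated objective: faster
-- what changed: Replaces the per-task linear scan for the least-loaded node by the closed-form observation that greedy assignment from all-zero loads with first-key tie-breaking is exactly round-robin over the distinct nodes, so B builds the dedup ring once and assigns task i to ring[i % k].
import Mathlib
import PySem

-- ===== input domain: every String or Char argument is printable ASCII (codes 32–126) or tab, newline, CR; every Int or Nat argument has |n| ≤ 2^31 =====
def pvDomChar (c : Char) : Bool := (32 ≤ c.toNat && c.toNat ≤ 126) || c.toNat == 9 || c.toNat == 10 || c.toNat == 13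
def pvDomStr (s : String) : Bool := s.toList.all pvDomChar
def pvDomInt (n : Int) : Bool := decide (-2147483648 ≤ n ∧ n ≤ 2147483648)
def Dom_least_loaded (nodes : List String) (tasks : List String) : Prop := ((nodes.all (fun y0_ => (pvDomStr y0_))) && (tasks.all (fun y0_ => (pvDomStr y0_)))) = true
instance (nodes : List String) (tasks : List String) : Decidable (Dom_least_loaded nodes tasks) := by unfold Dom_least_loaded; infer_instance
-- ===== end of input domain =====

-- B replaces A's per-task scan for the least-loaded node by the closed form
-- "greedy from all-zero loads with first-key ties = round-robin over the distinct nodes" (asymptotically faster).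


-- ===== PORT A =====
-- loop body of A: pick min(load, key=load.get) (first minimal key), assign, bump its load
def llStepA (st : PySem.Dict String String × PySem.Dict String Int) (task : String) :
    PySem.Dict String String × PySem.Dict String Int :=
  match PySem.List.min? st.2.keys (fun n => st.2.getD n 0) with
  | none => st          -- unreachable inside Pre_ (Python's min raises ValueError on an empty dict)
  | some m => (st.1.insert task m, st.2.insert m (st.2.getD m 0 + 1))

def least_loaded (nodes : List String) (tasks : List String) : List (String × String) :=
  (tasks.foldl llStepA
    (PySem.Dict.empty,
     nodes.foldl (fun d n => d.insert n (0 : Int)) PySem.Dict.empty)).1.items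

-- ===== PORT B =====
-- dict-comprehension body of B: assignments[task] = ring[i % k]
def llStepB (ring : List String) (d : PySem.Dict String String) (p : Int × String) :
    PySem.Dict String String :=
  d.insert p.2 (PySem.List.pyGetD ring (PySem.Int.mod p.1 (ring.length : Int)) "")
  -- pyGetD: inside Pre_ the index i % k is always in range, so this matches Python's ring[i % k]

def least_loaded_alt (nodes : List String) (tasks : List String) : List (String × String) :=
  ((PySem.List.enumerate tasks).foldl (llStepB (PySem.List.dedup nodes)) PySem.Dict.empty).items

-- ===== PRECONDITION & SPEC =====
-- If tasks is nonempty and nodes is empty, A raises ValueError (min of an empty dict): excluded.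
def Pre_least_loaded (nodes : List String) (tasks : List String) : Prop := tasks = [] ∨ nodes ≠ []
instance (nodes : List String) (tasks : List String) : Decidable (Pre_least_loaded nodes tasks) := by unfold Pre_least_loaded; infer_instance
def pvWitness_least_loaded : List String × List String := (["a", "b"], ["t1", "t2", "t3"])

def Spec_least_loaded (nodes : List String) (tasks : List String) (out : List (String × String)) : Prop := out = least_loaded_alt nodes tasks
instance (nodes : List String) (tasks : List String) (out : List (String × String)) : Decidable (Spec_least_loaded nodes tasks out) := by unfold Spec_least_loaded; infer_instance

-- ===== CLAIM (what is proved, stated in full; the proofs are below) =====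
def Claim_equal_least_loaded : Prop := ∀ (nodes : List String) (tasks : List String), Dom_least_loaded nodes tasks → Pre_least_loaded nodes tasks → Spec_least_loaded nodes tasks (least_loaded nodes tasks)

-- ===== LEMMAS AND PROOFS =====

-- the load dict after i = q*k + r steps: the first r ring nodes carry q+1, the rest q
def mkLoad (ring : List String) (q r : Nat) : List (String × Int) :=
  (ring.take r).map (fun n => (n, (q : Int) + 1)) ++ (ring.drop r).map (fun n => (n, (q : Int)))

theorem keys_mkLoad (ring : List String) (q r : Nat) :
    (PySem.Dict.mk (mkLoad ring q r)).keys = ring.take r ++ ring.drop r := by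
  simp [PySem.Dict.keys, mkLoad, Function.comp_def]

theorem min?_keep {f : String → Int} (l : List String) (m : String)
    (h : ∀ n ∈ l, ¬ f n < f m) :
    PySem.List.min? (m :: l) f = some m := by
  unfold PySem.List.min?
  simp only [List.foldl_cons]
  induction l with
  | nil => rfl
  | cons x xs ih =>
    simp only [List.foldl_cons]
    simp only [if_neg (h x (by simp))]
    exact ih (fun n hn => h n (by simp [hn]))

theorem min?_two_blocks {f : String → Int} (xs ys : List String) (y : String) (a b : Int)
    (hx : ∀ n ∈ xs, f n = a) (hy : f y = b) (hys : ∀ n ∈ ys, f n = b) (hba : b < a) :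
    PySem.List.min? (xs ++ y :: ys) f = some y := by
  have hkeepy := min?_keep (f := f) ys y (by intro n hn; rw [hys n hn, hy]; omega)
  unfold PySem.List.min? at hkeepy ⊢
  simp only [List.foldl_cons] at hkeepy
  rw [List.foldl_append]
  cases xs with
  | nil => simpa using hkeepy
  | cons x xs' =>
    have hkeepx := min?_keep (f := f) xs' x
      (by intro n hn; rw [hx n (by simp [hn]), hx x (by simp)]; omega)
    unfold PySem.List.min? at hkeepx
    simp only [List.foldl_cons] at hkeepx
    simp only [List.foldl_cons]
    rw [hkeepx]
    have hcond : f y < f x := by rw [hy, hx x (by simp)]; exact hba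
    split
    next heq => exact absurd heq (by simp)
    next m heq =>
      injection heq with heq'
      subst heq'
      rw [if_pos hcond]
      exact hkeepy

theorem nodup_keys_mkLoad (ring : List String) (q r : Nat) (hnd : ring.Nodup) :
    (PySem.Dict.mk (mkLoad ring q r)).keys.Nodup := by
  rw [keys_mkLoad, List.take_append_drop]; exact hnd

theorem getD_mkLoad_r (ring : List String) (q r : Nat) (hr : r < ring.length) (hnd : ring.Nodup) :
    (PySem.Dict.mk (mkLoad ring q r)).getD ring[r] 0 = q := by
  have hdrop : ring.drop r = ring[r] :: ring.drop (r + 1) := (List.getElem_cons_drop hr).symm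
  have hmem : (ring[r], (q : Int)) ∈ (PySem.Dict.mk (mkLoad ring q r)).items := by
    show (ring[r], (q : Int)) ∈ mkLoad ring q r
    unfold mkLoad
    refine List.mem_append_right _ ?_
    rw [hdrop]
    exact List.mem_cons_self ..
  exact PySem.Dict.getD_of_mem_items _ hmem (nodup_keys_mkLoad ring q r hnd) 0

theorem min?_mkLoad (ring : List String) (q r : Nat) (hr : r < ring.length) (hnd : ring.Nodup) :
    PySem.List.min? (PySem.Dict.mk (mkLoad ring q r)).keys
      (fun n => (PySem.Dict.mk (mkLoad ring q r)).getD n 0) = some ring[r] := by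
  have hkeysnd := nodup_keys_mkLoad ring q r hnd
  have hdrop : ring.drop r = ring[r] :: ring.drop (r + 1) := (List.getElem_cons_drop hr).symm
  rw [keys_mkLoad, hdrop]
  apply min?_two_blocks (a := (q : Int) + 1) (b := (q : Int))
  · intro n hn
    have hmem : (n, (q : Int) + 1) ∈ (PySem.Dict.mk (mkLoad ring q r)).items :=
      List.mem_append_left _ (List.mem_map_of_mem hn)
    exact PySem.Dict.getD_of_mem_items _ hmem hkeysnd 0
  · exact getD_mkLoad_r ring q r hr hnd
  · intro n hn
    have hmem : (n, (q : Int)) ∈ (PySem.Dict.mk (mkLoad ring q r)).items := by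
      refine List.mem_append_right _ ?_
      rw [hdrop]
      exact List.mem_cons_of_mem _ (List.mem_map_of_mem hn)
    exact PySem.Dict.getD_of_mem_items _ hmem hkeysnd 0
  · omega

theorem insert_mkLoad (ring : List String) (q r : Nat) (hr : r < ring.length) (hnd : ring.Nodup) :
    (PySem.Dict.mk (mkLoad ring q r)).insert ring[r]
        ((PySem.Dict.mk (mkLoad ring q r)).getD ring[r] 0 + 1)
      = PySem.Dict.mk (mkLoad ring q (r + 1)) := by
  have hdrop : ring.drop r = ring[r] :: ring.drop (r + 1) := (List.getElem_cons_drop hr).symm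
  have hdisj : List.Disjoint (ring.take r) (ring.drop r) := by
    have h2 : (ring.take r ++ ring.drop r).Nodup := by rw [List.take_append_drop]; exact hnd
    exact List.disjoint_of_nodup_append h2
  have hnotin_take : ring[r] ∉ ring.take r := by
    intro hmem
    exact hdisj hmem (by rw [hdrop]; exact List.mem_cons_self ..)
  have hnotin_drop : ring[r] ∉ ring.drop (r + 1) := by
    have hnd' : (ring.drop r).Nodup := List.Nodup.sublist (List.drop_sublist r ring) hnd
    rw [hdrop] at hnd'
    exact (List.nodup_cons.mp hnd').1
  have hcont : (PySem.Dict.mk (mkLoad ring q r)).contains ring[r] = true := by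
    rw [PySem.Dict.contains_iff_mem_keys, keys_mkLoad]
    refine List.mem_append_right _ ?_
    rw [hdrop]; exact List.mem_cons_self ..
  apply PySem.Dict.ext
  rw [PySem.Dict.items_insert, hcont, getD_mkLoad_r ring q r hr hnd]
  simp only [if_true]
  show (mkLoad ring q r).map _ = mkLoad ring q (r + 1)
  unfold mkLoad
  rw [List.map_append, List.map_map, List.map_map]
  have htake : ring.take (r + 1) = ring.take r ++ [ring[r]] := by
    rw [List.take_add_one, List.getElem?_eq_getElem hr]; rfl
  have hb1 : List.map ((fun p => if (p.1 == ring[r]) = true then (ring[r], (q : Int) + 1) else p)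
        ∘ fun n => (n, (q : Int) + 1)) (ring.take r)
      = (ring.take r).map (fun n => (n, (q : Int) + 1)) := by
    apply List.map_congr_left
    intro n hn
    have hne : (n == ring[r]) = false := by
      simp only [beq_eq_false_iff_ne, ne_eq]
      intro heq; exact hnotin_take (heq ▸ hn)
    simp [Function.comp, hne]
  have hb2 : List.map ((fun p => if (p.1 == ring[r]) = true then (ring[r], (q : Int) + 1) else p)
        ∘ fun n => (n, (q : Int))) (ring.drop r)
      = (ring[r], (q : Int) + 1) :: (ring.drop (r + 1)).map (fun n => (n, (q : Int))) := by
    rw [hdrop, List.map_cons]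
    have hd1 : ((fun p => if (p.1 == ring[r]) = true then (ring[r], (q : Int) + 1) else p)
        ∘ fun n => (n, (q : Int))) ring[r] = (ring[r], (q : Int) + 1) := by
      simp [Function.comp]
    rw [hd1]
    congr 1
    apply List.map_congr_left
    intro n hn
    have hne : (n == ring[r]) = false := by
      simp only [beq_eq_false_iff_ne, ne_eq]
      intro heq; exact hnotin_drop (heq ▸ hn)
    simp [Function.comp, hne]
  rw [hb1, hb2, htake, List.map_append]
  simp [List.append_assoc]

theorem mkLoad_wrap (ring : List String) (q : Nat) :
    mkLoad ring q ring.length = mkLoad ring (q + 1) 0 := by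
  unfold mkLoad
  simp [List.take_length, List.drop_length]

theorem succ_div_mod_lt (i k : Nat) (hk : 0 < k) (h : i % k + 1 < k) :
    (i + 1) / k = i / k ∧ (i + 1) % k = i % k + 1 := by
  have hdm := Nat.div_add_mod i k
  have hi : i + 1 = (i % k + 1) + (i / k) * k := by
    rw [Nat.mul_comm (i / k) k]; omega
  constructor
  · rw [hi, Nat.add_mul_div_right _ _ hk, Nat.div_eq_of_lt h, Nat.zero_add]
  · rw [hi, Nat.add_mul_mod_self_right, Nat.mod_eq_of_lt h]

theorem succ_div_mod_eq (i k : Nat) (hk : 0 < k) (h : i % k + 1 = k) :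
    (i + 1) / k = i / k + 1 ∧ (i + 1) % k = 0 := by
  have hdm := Nat.div_add_mod i k
  have hi : i + 1 = (i / k + 1) * k := by
    have h2 : i + 1 = k * (i / k) + k := by omega
    rw [h2]; ring
  constructor
  · rw [hi, Nat.mul_div_cancel _ hk]
  · rw [hi, Nat.mul_mod_left]

theorem llStepA_eq (st : PySem.Dict String String × PySem.Dict String Int) (task m : String)
    (h : PySem.List.min? st.2.keys (fun n => st.2.getD n 0) = some m) :
    llStepA st task = (st.1.insert task m, st.2.insert m (st.2.getD m 0 + 1)) := by
  unfold llStepA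
  rw [h]

set_option maxHeartbeats 1000000 in
theorem loop_eq (ring : List String) (hnd : ring.Nodup) (hne : ring ≠ []) :
    ∀ (ts : List String) (i : Nat) (d : PySem.Dict String String),
      (ts.foldl llStepA (d, PySem.Dict.mk (mkLoad ring (i / ring.length) (i % ring.length)))).1
        = (PySem.List.enumerate ts (i : Int)).foldl (llStepB ring) d := by
  intro ts
  induction ts with
  | nil => intro i d; simp [PySem.List.enumerate_nil]
  | cons t ts ih =>
    intro i d
    have hk : 0 < ring.length := List.length_pos_of_ne_nil hne
    have hr : i % ring.length < ring.length := Nat.mod_lt _ hk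
    rw [List.foldl_cons, llStepA_eq _ t ring[i % ring.length]
      (min?_mkLoad ring (i / ring.length) (i % ring.length) hr hnd)]
    rw [PySem.List.enumerate_cons, List.foldl_cons]
    have hstepB : llStepB ring d ((i : Int), t) = d.insert t ring[i % ring.length] := by
      unfold llStepB
      simp only [PySem.Int.mod_natCast, PySem.List.pyGetD_natCast]
      rw [List.getD_eq_getElem _ _ hr]
    rw [hstepB]
    rw [insert_mkLoad ring (i / ring.length) (i % ring.length) hr hnd]
    rw [show ((i : Int) + 1) = ((i + 1 : Nat) : Int) by push_cast; ring]
    rcases Nat.lt_or_ge (i % ring.length + 1) ring.length with hlt | hge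
    · obtain ⟨hd, hm⟩ := succ_div_mod_lt i ring.length hk hlt
      rw [show mkLoad ring (i / ring.length) (i % ring.length + 1)
            = mkLoad ring ((i + 1) / ring.length) ((i + 1) % ring.length) by rw [hd, hm]]
      exact ih (i + 1) (d.insert t ring[i % ring.length])
    · have heq : i % ring.length + 1 = ring.length := by omega
      obtain ⟨hd, hm⟩ := succ_div_mod_eq i ring.length hk heq
      rw [show mkLoad ring (i / ring.length) (i % ring.length + 1)
            = mkLoad ring ((i + 1) / ring.length) ((i + 1) % ring.length) by
          rw [heq, mkLoad_wrap, hd, hm]]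
      exact ih (i + 1) (d.insert t ring[i % ring.length])

theorem getD_fold_zero : ∀ (l : List String) (d : PySem.Dict String Int)
    (h : ∀ n, d.getD n 0 = 0) (m : String),
    (l.foldl (fun d n => d.insert n 0) d).getD m 0 = 0 := by
  intro l
  induction l with
  | nil => intro d h m; exact h m
  | cons x xs ih =>
    intro d h m
    rw [List.foldl_cons]
    apply ih
    intro n
    rw [PySem.Dict.getD_insert]
    split_ifs with hn
    · rfl
    · exact h n

theorem load0_eq (nodes : List String) :
    nodes.foldl (fun d n => d.insert n 0) (PySem.Dict.empty : PySem.Dict String Int)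
      = PySem.Dict.mk (mkLoad (PySem.List.dedup nodes) 0 0) := by
  have hnd : (nodes.foldl (fun d n => d.insert n 0) (PySem.Dict.empty : PySem.Dict String Int)).keys.Nodup := by
    apply PySem.Dict.nodup_keys_foldl_insert
    exact PySem.Dict.nodup_keys_empty
  apply PySem.Dict.ext
  rw [PySem.Dict.items_eq_map_keys _ hnd 0]
  have hkeys : (nodes.foldl (fun d n => d.insert n 0) (PySem.Dict.empty : PySem.Dict String Int)).keys
      = PySem.List.dedup nodes := by
    rw [PySem.Dict.keys_foldl_insert]
    simp [PySem.Dict.keys_empty]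
    rfl
  rw [hkeys]
  show _ = mkLoad (PySem.List.dedup nodes) 0 0
  unfold mkLoad
  simp only [List.take_zero, List.drop_zero, List.map_nil, List.nil_append, Nat.cast_zero]
  apply List.map_congr_left
  intro n hn
  rw [getD_fold_zero nodes PySem.Dict.empty (fun m => PySem.Dict.getD_empty ..) n]

-- ===== VERDICT (by name: the statement is the Claim_ definition above) =====
theorem least_loaded_spec : Claim_equal_least_loaded := by
  intro nodes tasks _ hpre
  unfold Spec_least_loaded
  rcases hpre with htasks | hnodes
  · subst htasks
    rfl
  · unfold least_loaded least_loaded_alt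
    have hnd : (PySem.List.dedup nodes).Nodup := PySem.List.nodup_dedup nodes
    have hne : PySem.List.dedup nodes ≠ [] := by
      rcases nodes with _ | ⟨n, rest⟩
      · exact absurd rfl hnodes
      · exact List.ne_nil_of_mem ((PySem.List.mem_dedup _ _).mpr (List.mem_cons_self ..))
    rw [load0_eq]
    have h := loop_eq (PySem.List.dedup nodes) hnd hne tasks 0 PySem.Dict.empty
    simp only [Nat.zero_div, Nat.zero_mod, Nat.cast_zero] at h
    rw [h]
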